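-- pv_equiv track=rewrite | github.com/TimeNtWait/WhiteFang | Yandex_Algorithms_3_0/HomeWork_Division_B/Task_31/Task_31.py | find_componenta
-- ===== SOURCE A (Python) =====
-- def create_graph(edges):
--     graph = {}
--     for v1, v2 in edges:
--         # if v1 == v2:
--         #     continue
--         if v1 in graph:
--             graph[v1].append(v2)
--         else:
--             graph[v1] = [v2]
--         if v2 in graph:
--             graph[v2].append(v1)
--         else:
--             graph[v2] = [v1]
--     return graph
--
-- def find_componenta(n, m, edges):
--     '''
--     входные данные
--     :n — количество вершин в графе
--     :m — количество ребер в графе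
--     :edges — ребра графа
--
--     выходные данные
--     :describe_componenta - информация о компоненте связности: количество вершин + Вершины компоненты связности,
--     перечисленные в порядке возрастания номеров.
--     '''
--     if n == 0:
--         return "0"
--     elif m == 0:
--         return "1\n1"
--     graph = create_graph(edges)
--     if 1 not in graph:
--         return "1\n1"
--     visited = {}
--     for v in graph.keys():
--         visited[v] = False
--     dfs(graph, 1, visited)
--     vertexes = []
--     for v in visited:
--         if visited[v]:
--             vertexes.append(v)
--     vertexes.sort()
--     describe_componenta = f"{len(vertexes)}" + "\n" + " ".join(map(str, vertexes))
--     return describe_componenta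
--
-- def dfs(graph, vertex, visited):
--     for v in graph[vertex]:
--         if not visited[v]:
--             visited[v] = True
--             dfs(graph, v, visited)
-- ===== SOURCE B (Python) =====
-- def create_graph(edges):
--     graph = {}
--     for v1, v2 in edges:
--         if v1 in graph:
--             graph[v1].append(v2)
--         else:
--             graph[v1] = [v2]
--         if v2 in graph:
--             graph[v2].append(v1)
--         else:
--             graph[v2] = [v1]
--     return graph
--
-- def find_componenta(n, m, edges):
--     if n == 0:
--         return "0"
--     elif m == 0:
--         return "1\n1"
--     graph = create_graph(edges)
--     if 1 not in graph:
--         return "1\n1"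
--     # round-based saturation instead of recursive DFS: after len(graph) rounds
--     # the set is closed under adjacency, hence equals the component of 1
--     comp = {1}
--     for _ in range(len(graph)):
--         comp = comp | {w for v in comp for w in graph[v]}
--     vertexes = sorted(comp)
--     return f"{len(vertexes)}" + "\n" + " ".join(map(str, vertexes))
-- ===== Notes on version B (the rewrite author's own statement) =====
-- stated objective: alternative
-- what changed: The recursive DFS (with its mutable visited dict) is replaced by a round-based saturation: starting from {1}, len(graph) rounds of comp |= neighbours(comp) reach the fixpoint, which is the component of vertex 1; create_graph, the guard clauses and the output formatting are unchanged.
import Mathlib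
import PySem

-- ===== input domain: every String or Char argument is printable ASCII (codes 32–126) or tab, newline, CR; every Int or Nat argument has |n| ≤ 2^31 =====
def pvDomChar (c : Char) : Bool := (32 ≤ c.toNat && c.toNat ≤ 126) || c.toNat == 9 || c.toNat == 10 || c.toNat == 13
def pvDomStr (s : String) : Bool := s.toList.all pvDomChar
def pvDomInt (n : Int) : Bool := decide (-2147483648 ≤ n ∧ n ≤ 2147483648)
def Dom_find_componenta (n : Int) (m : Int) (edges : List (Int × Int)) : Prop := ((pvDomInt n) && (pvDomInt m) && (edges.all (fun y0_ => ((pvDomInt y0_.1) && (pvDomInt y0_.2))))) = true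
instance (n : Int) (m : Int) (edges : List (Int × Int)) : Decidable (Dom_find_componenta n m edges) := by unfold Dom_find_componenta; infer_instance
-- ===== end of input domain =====

-- B replaces A's recursive DFS by a round-based saturation of the component of vertex 1 (alternative algorithm, same result).


-- ===== PORT A =====
-- create_graph: for v1, v2 in edges: append to (or create) the adjacency lists of both endpoints
def create_graph (edges : List (Int × Int)) : PySem.Dict Int (List Int) :=
  edges.foldl (fun graph e =>
    let graph1 := if graph.contains e.1 then graph.modify e.1 [] (· ++ [e.2]) else graph.insert e.1 [e.2]
    if graph1.contains e.2 then graph1.modify e.2 [] (· ++ [e.1]) else graph1.insert e.2 [e.1])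
    PySem.Dict.empty

-- dfs: Python's recursion has no fuel; the fuel argument only makes it total.  find_componenta calls it
-- with fuel = number of keys + 1, which is proved sufficient (each nested call first marks an unmarked
-- vertex, so the recursion depth never exceeds the number of keys + 1).
-- 'visited[v]' is ported as getD v false: every v in an adjacency list is a key of visited (exact, no KeyError).
def dfsA (graph : PySem.Dict Int (List Int)) : Nat → Int → PySem.Dict Int Bool → PySem.Dict Int Bool
  | 0, _, visited => visited
  | fuel+1, _vertex, visited =>
    (graph.getD _vertex []).foldl (fun vis v =>
      if vis.getD v false = false then dfsA graph fuel v (vis.insert v true) else vis) visited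

def find_componenta (n : Int) (m : Int) (edges : List (Int × Int)) : String :=
  if n = 0 then "0"
  else if m = 0 then "1\n1"
  else
    let graph := create_graph edges
    if ¬ (graph.contains 1) then "1\n1"
    else
      let visited0 := graph.keys.foldl (fun vis v => vis.insert v false) PySem.Dict.empty
      let visited := dfsA graph (graph.keys.length + 1) 1 visited0
      let vertexes := visited.keys.foldl (fun acc v => if visited.getD v false then acc ++ [v] else acc) []
      let vertexes := PySem.List.sorted vertexes (fun x => x) false
      PySem.Int.toStr (vertexes.length) ++ "\n" ++ PySem.Str.join " " (vertexes.map PySem.Int.toStr)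

-- ===== PORT B =====
-- B: same create_graph and guards; the component of 1 is computed by saturation:
-- len(graph) rounds of  comp = comp | {w for v in comp for w in graph[v]}
def find_componenta_alt (n : Int) (m : Int) (edges : List (Int × Int)) : String :=
  if n = 0 then "0"
  else if m = 0 then "1\n1"
  else
    let graph := create_graph edges
    if ¬ (graph.contains 1) then "1\n1"
    else
      let comp := (List.range graph.keys.length).foldl
        (fun comp _ => PySem.Set.update comp (comp.flatMap (fun v => graph.getD v [])))
        (PySem.Set.ofList [1])
      let vertexes := PySem.List.sorted comp (fun x => x) false
      PySem.Int.toStr (vertexes.length) ++ "\n" ++ PySem.Str.join " " (vertexes.map PySem.Int.toStr)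

-- ===== PRECONDITION & SPEC =====
def Spec_find_componenta (n : Int) (m : Int) (edges : List (Int × Int)) (out : String) : Prop := out = find_componenta_alt n m edges
instance (n : Int) (m : Int) (edges : List (Int × Int)) (out : String) : Decidable (Spec_find_componenta n m edges out) := by unfold Spec_find_componenta; infer_instance

-- ===== CLAIM (what is proved, stated in full; the proofs are below) =====
def Claim_equal_find_componenta : Prop := ∀ (n : Int) (m : Int) (edges : List (Int × Int)), Dom_find_componenta n m edges → Spec_find_componenta n m edges (find_componenta n m edges)


-- ===== LEMMAS AND PROOFS =====

-- adjacency relation of the built graph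
def EdgeG (g : PySem.Dict Int (List Int)) (u v : Int) : Prop := v ∈ g.getD u []

-- one half of create_graph's loop body
def add1 (g : PySem.Dict Int (List Int)) (x y : Int) : PySem.Dict Int (List Int) :=
  if g.contains x then g.modify x [] (· ++ [y]) else g.insert x [y]

lemma create_graph_eq (edges : List (Int × Int)) :
    create_graph edges = edges.foldl (fun g e => add1 (add1 g e.1 e.2) e.2 e.1) PySem.Dict.empty := rfl

lemma getD_add1 (g : PySem.Dict Int (List Int)) (x y u : Int) :
    (add1 g x y).getD u [] = if u = x then g.getD x [] ++ [y] else g.getD u [] := by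
  unfold add1
  by_cases hc : g.contains x = true
  · rw [if_pos hc, PySem.Dict.getD_modify]
  · rw [if_neg hc, PySem.Dict.getD_insert]
    by_cases hux : u = x
    · subst hux
      rw [if_pos rfl, if_pos rfl,
        PySem.Dict.getD_of_not_contains g [] (by simpa using hc), List.nil_append]
    · rw [if_neg hux, if_neg hux]

lemma mem_getD_add1 (g : PySem.Dict Int (List Int)) (x y u v : Int) :
    v ∈ (add1 g x y).getD u [] ↔ v ∈ g.getD u [] ∨ (u = x ∧ v = y) := by
  rw [getD_add1]
  by_cases hux : u = x
  · subst hux; simp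
  · simp [hux]

lemma contains_add1 (g : PySem.Dict Int (List Int)) (x y u : Int) :
    (add1 g x y).contains u = (g.contains u || u == x) := by
  unfold add1
  by_cases hc : g.contains x = true
  · rw [if_pos hc, PySem.Dict.contains_modify, Bool.or_comm]
  · rw [if_neg hc, PySem.Dict.contains_insert, Bool.or_comm]

lemma nodup_keys_add1 (g : PySem.Dict Int (List Int)) (x y : Int) (h : g.keys.Nodup) :
    (add1 g x y).keys.Nodup := by
  unfold add1
  by_cases hc : g.contains x = true
  · rw [if_pos hc, PySem.Dict.keys_modify, PySem.Dict.keys_insert_of_contains _ _ hc]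
    exact h
  · rw [if_neg hc]
    exact PySem.Dict.nodup_keys_insert g x [y] h

lemma cg_mem_aux (edges : List (Int × Int)) (acc : PySem.Dict Int (List Int)) (u v : Int) :
    v ∈ (edges.foldl (fun g e => add1 (add1 g e.1 e.2) e.2 e.1) acc).getD u [] ↔
      v ∈ acc.getD u [] ∨ (u, v) ∈ edges ∨ (v, u) ∈ edges := by
  induction edges generalizing acc with
  | nil => simp
  | cons e es ih =>
    simp only [List.foldl_cons, ih, mem_getD_add1, List.mem_cons, Prod.ext_iff]
    tauto

lemma cg_mem (edges : List (Int × Int)) (u v : Int) :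
    v ∈ (create_graph edges).getD u [] ↔ (u, v) ∈ edges ∨ (v, u) ∈ edges := by
  rw [create_graph_eq, cg_mem_aux]
  simp [PySem.Dict.getD_empty]

lemma cg_contains_aux (edges : List (Int × Int)) (acc : PySem.Dict Int (List Int)) (u : Int) :
    (edges.foldl (fun g e => add1 (add1 g e.1 e.2) e.2 e.1) acc).contains u =
      (acc.contains u || edges.any (fun e => e.1 == u || e.2 == u)) := by
  induction edges generalizing acc with
  | nil => simp
  | cons e es ih =>
    simp only [List.foldl_cons, ih, contains_add1, List.any_cons]
    apply Bool.eq_iff_iff.mpr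
    simp only [Bool.or_eq_true, beq_iff_eq]
    constructor
    · rintro (((h | h) | h) | h) <;> tauto
    · rintro (h | (h | h) | h) <;> subst_eqs <;> tauto

lemma cg_sym (edges : List (Int × Int)) (u v : Int) :
    EdgeG (create_graph edges) u v ↔ EdgeG (create_graph edges) v u := by
  unfold EdgeG
  rw [cg_mem, cg_mem]
  tauto

lemma cg_closed (edges : List (Int × Int)) (u v : Int)
    (h : v ∈ (create_graph edges).getD u []) : (create_graph edges).contains v = true := by
  rw [cg_mem] at h
  rw [create_graph_eq, cg_contains_aux, PySem.Dict.contains_empty, Bool.false_or,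
    List.any_eq_true]
  rcases h with h | h
  · exact ⟨(u, v), h, by simp⟩
  · exact ⟨(v, u), h, by simp⟩

lemma cg_nodup (edges : List (Int × Int)) : (create_graph edges).keys.Nodup := by
  rw [create_graph_eq]
  have main : ∀ (es : List (Int × Int)) (acc : PySem.Dict Int (List Int)), acc.keys.Nodup →
      (es.foldl (fun g e => add1 (add1 g e.1 e.2) e.2 e.1) acc).keys.Nodup := by
    intro es
    induction es with
    | nil => intro acc h; exact h
    | cons e es ih =>
      intro acc h
      exact ih _ (nodup_keys_add1 _ _ _ (nodup_keys_add1 _ _ _ h))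
  exact main edges _ (by simp [PySem.Dict.keys_empty])

lemma cg_nonnil (edges : List (Int × Int)) (u : Int)
    (h : (create_graph edges).contains u = true) : (create_graph edges).getD u [] ≠ [] := by
  rw [create_graph_eq] at h ⊢
  have main : ∀ (es : List (Int × Int)) (acc : PySem.Dict Int (List Int)),
      (∀ w, acc.contains w = true → acc.getD w [] ≠ []) →
      ∀ w, (es.foldl (fun g e => add1 (add1 g e.1 e.2) e.2 e.1) acc).contains w = true →
        (es.foldl (fun g e => add1 (add1 g e.1 e.2) e.2 e.1) acc).getD w [] ≠ [] := by
    intro es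
    induction es with
    | nil => intro acc h; exact h
    | cons e es ih =>
      intro acc h
      apply ih
      intro w hw
      rw [contains_add1, contains_add1, Bool.or_eq_true, Bool.or_eq_true] at hw
      rw [getD_add1]
      by_cases h2 : w = e.2
      · simp [h2]
      · rw [if_neg h2, getD_add1]
        by_cases h1 : w = e.1
        · simp [h1]
        · rw [if_neg h1]
          rcases hw with (hw | hw) | hw
          · exact h w hw
          · exact absurd (by simpa using hw) h1
          · exact absurd (by simpa using hw) h2
  exact main edges _ (by intro w hw; rw [PySem.Dict.contains_empty] at hw; cases hw) u h

-- ---- A side: the DFS invariant ----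

-- number of still-unmarked entries
def fc (vis : PySem.Dict Int Bool) : Nat := vis.keys.countP (fun k => vis.getD k false == false)

lemma fc_le (vis : PySem.Dict Int Bool) : fc vis ≤ vis.keys.length := List.countP_le_length

lemma fc_insert_lt (vis : PySem.Dict Int Bool) (v : Int) (hnd : vis.keys.Nodup)
    (hmem : v ∈ vis.keys) (hfalse : vis.getD v false = false) :
    fc (vis.insert v true) < fc vis := by
  have hc : vis.contains v = true := (PySem.Dict.contains_iff_mem_keys vis v).mpr hmem
  unfold fc
  rw [PySem.Dict.keys_insert_of_contains _ _ hc]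
  obtain ⟨l1, l2, hsplit⟩ := List.append_of_mem hmem
  rw [hsplit]
  rw [hsplit, List.nodup_append] at hnd
  have hv1 : v ∉ l1 := fun hv => hnd.2.2 v hv v List.mem_cons_self rfl
  have hv2 : v ∉ l2 := by
    have h2 := hnd.2.1
    rw [List.nodup_cons] at h2
    exact h2.1
  rw [List.countP_append, List.countP_append, List.countP_cons, List.countP_cons]
  have e1 : List.countP (fun k => (vis.insert v true).getD k false == false) l1
      = List.countP (fun k => vis.getD k false == false) l1 := by
    apply List.countP_congr
    intro x hx
    rw [PySem.Dict.getD_insert, if_neg (by rintro rfl; exact hv1 hx)]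
  have e2 : List.countP (fun k => (vis.insert v true).getD k false == false) l2
      = List.countP (fun k => vis.getD k false == false) l2 := by
    apply List.countP_congr
    intro x hx
    rw [PySem.Dict.getD_insert, if_neg (by rintro rfl; exact hv2 hx)]
  have ev : ((vis.insert v true).getD v false == false) = false := by
    rw [PySem.Dict.getD_insert, if_pos rfl]
    rfl
  have ev2 : ((vis.getD v false == false) : Bool) = true := by
    rw [hfalse]
    rfl
  rw [e1, e2, ev, ev2]
  simp

lemma fc_mono (vis r : PySem.Dict Int Bool) (hk : r.keys = vis.keys)
    (hm : ∀ w, vis.getD w false = true → r.getD w false = true) : fc r ≤ fc vis := by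
  unfold fc
  rw [hk]
  apply List.countP_mono_left
  intro x _ hx
  simp only [beq_iff_eq] at hx ⊢
  cases hvx : vis.getD x false with
  | false => rfl
  | true => rw [hm x hvx] at hx; cases hx

-- what one dfs call (resp. one fold over a neighbour list l) guarantees
def Post (g : PySem.Dict Int (List Int)) (vertex : Int) (l : List Int)
    (vis r : PySem.Dict Int Bool) : Prop :=
  r.keys = vis.keys ∧
  (∀ w, vis.getD w false = true → r.getD w false = true) ∧
  (∀ v ∈ l, r.getD v false = true) ∧
  (∀ u, r.getD u false = true → vis.getD u false = true ∨
    (Relation.TransGen (EdgeG g) vertex u ∧ ∀ v ∈ g.getD u [], r.getD v false = true))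

theorem dfs_inv (g : PySem.Dict Int (List Int))
    (Hcl : ∀ u v, v ∈ g.getD u [] → g.contains v = true)
    (Hnd : g.keys.Nodup) :
    ∀ fuel vertex vis, vis.keys = g.keys → fc vis < fuel →
      Post g vertex (g.getD vertex []) vis (dfsA g fuel vertex vis) := by
  intro fuel
  induction fuel with
  | zero => intro vertex vis _ hfc; omega
  | succ f ihf =>
    intro vertex
    have fold : ∀ (l : List Int), (∀ v ∈ l, v ∈ g.getD vertex []) →
        ∀ vis, vis.keys = g.keys → fc vis < f + 1 →
        Post g vertex l vis
          (l.foldl (fun vis v => if vis.getD v false = false then dfsA g f v (vis.insert v true) else vis) vis) := by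
      intro l
      induction l with
      | nil =>
        intro _ vis hk hfc
        exact ⟨rfl, fun w h => h, by simp, fun u hu => Or.inl hu⟩
      | cons v rest ihl =>
        intro hl vis hk hfc
        have hvadj : v ∈ g.getD vertex [] := hl v List.mem_cons_self
        rw [List.foldl_cons]
        by_cases hv : vis.getD v false = false
        · rw [if_pos hv]
          have hvkeys : v ∈ vis.keys := by
            rw [hk]
            exact (PySem.Dict.contains_iff_mem_keys g v).mp (Hcl vertex v hvadj)
          have hnd' : vis.keys.Nodup := by rw [hk]; exact Hnd
          have hcont : vis.contains v = true := (PySem.Dict.contains_iff_mem_keys vis v).mpr hvkeys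
          have hkeys1 : (vis.insert v true).keys = vis.keys :=
            PySem.Dict.keys_insert_of_contains _ _ hcont
          have hfc1 : fc (vis.insert v true) < f := by
            have := fc_insert_lt vis v hnd' hvkeys hv
            omega
          obtain ⟨k1, m1, a1, s1⟩ := ihf v (vis.insert v true) (hkeys1.trans hk) hfc1
          have hm1 : ∀ w, vis.getD w false = true →
              (dfsA g f v (vis.insert v true)).getD w false = true := by
            intro w hw
            apply m1
            rw [PySem.Dict.getD_insert]
            split <;> [rfl; exact hw]
          have hfcr : fc (dfsA g f v (vis.insert v true)) < f + 1 := by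
            have := fc_mono (vis.insert v true) _ k1 m1
            omega
          obtain ⟨k2, m2, a2, s2⟩ :=
            ihl (fun w hw => hl w (List.mem_cons_of_mem _ hw)) (dfsA g f v (vis.insert v true))
              (k1.trans (hkeys1.trans hk)) hfcr
          refine ⟨k2.trans (k1.trans hkeys1), fun w hw => m2 w (hm1 w hw), ?_, ?_⟩
          · intro w hw
            rcases List.mem_cons.mp hw with rfl | hw
            · apply m2
              apply m1
              rw [PySem.Dict.getD_insert, if_pos rfl]
            · exact a2 w hw
          · intro u hu
            rcases s2 u hu with h1 | ⟨tg, cl⟩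
            · rcases s1 u h1 with h0 | ⟨tg, cl⟩
              · rw [PySem.Dict.getD_insert] at h0
                by_cases huv : u = v
                · subst huv
                  refine Or.inr ⟨Relation.TransGen.single hvadj, ?_⟩
                  intro w hw
                  exact m2 w (a1 w hw)
                · rw [if_neg huv] at h0
                  exact Or.inl h0
              · exact Or.inr ⟨Relation.TransGen.head hvadj tg, fun w hw => m2 w (cl w hw)⟩
            · exact Or.inr ⟨tg, cl⟩
        · rw [if_neg hv]
          have hvt : vis.getD v false = true := by
            cases h : vis.getD v false with
            | false => exact absurd h hv
            | true => rfl
          obtain ⟨k2, m2, a2, s2⟩ := ihl (fun w hw => hl w (List.mem_cons_of_mem _ hw)) vis hk hfc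
          refine ⟨k2, m2, ?_, s2⟩
          intro w hw
          rcases List.mem_cons.mp hw with rfl | hw
          · exact m2 w hvt
          · exact a2 w hw
    intro vis hk hfc
    simp only [dfsA]
    exact fold (g.getD vertex []) (fun _ h => h) vis hk (by omega)

-- the initial all-False visited dict
lemma vis0_keys (g : PySem.Dict Int (List Int)) (h : g.keys.Nodup) :
    (g.keys.foldl (fun vis v => vis.insert v false) PySem.Dict.empty).keys = g.keys := by
  rw [PySem.Dict.keys_foldl_insert g.keys (fun _ _ => false) PySem.Dict.empty]
  rw [PySem.Dict.keys_empty]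
  exact PySem.Set.ofList_eq_self_of_nodup g.keys h

lemma vis0_false (g : PySem.Dict Int (List Int)) (w : Int) :
    (g.keys.foldl (fun vis v => vis.insert v false) PySem.Dict.empty).getD w false = false := by
  have main : ∀ (l : List Int) (acc : PySem.Dict Int Bool), acc.getD w false = false →
      (l.foldl (fun vis v => vis.insert v false) acc).getD w false = false := by
    intro l
    induction l with
    | nil => intro acc h; exact h
    | cons x l ih =>
      intro acc h
      apply ih
      rw [PySem.Dict.getD_insert]
      split <;> [rfl; exact h]
  exact main g.keys PySem.Dict.empty (by rw [PySem.Dict.getD_empty])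

-- the DFS marks exactly the vertices TransGen-reachable from 1
theorem A_marked_iff (edges : List (Int × Int)) (u : Int) :
    (dfsA (create_graph edges) ((create_graph edges).keys.length + 1) 1
        ((create_graph edges).keys.foldl (fun vis v => vis.insert v false) PySem.Dict.empty)).getD u false = true
      ↔ Relation.TransGen (EdgeG (create_graph edges)) 1 u := by
  set g := create_graph edges with hg
  set vis0 := g.keys.foldl (fun vis v => vis.insert v false) PySem.Dict.empty with hvis0
  have hk : vis0.keys = g.keys := vis0_keys g (cg_nodup edges)
  have hfc : fc vis0 < g.keys.length + 1 := by
    have h1 := fc_le vis0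
    rw [hk] at h1
    omega
  obtain ⟨k1, m1, a1, s1⟩ := dfs_inv g (fun u v h => cg_closed edges u v h) (cg_nodup edges)
    (g.keys.length + 1) 1 vis0 hk hfc
  constructor
  · intro hu
    rcases s1 u hu with h0 | ⟨tg, _⟩
    · rw [vis0_false] at h0
      cases h0
    · exact tg
  · intro tg
    induction tg with
    | single h => exact a1 _ h
    | tail tg h ih =>
      rcases s1 _ ih with h0 | ⟨_, cl⟩
      · rw [vis0_false] at h0
        cases h0
      · exact cl _ h

-- ---- B side: the saturation ----

def compF (g : PySem.Dict Int (List Int)) (s : PySem.Set Int) : PySem.Set Int :=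
  PySem.Set.update s (s.flatMap (fun v => g.getD v []))

def compIter (g : PySem.Dict Int (List Int)) (k : Nat) : PySem.Set Int :=
  (List.range k).foldl (fun c _ => compF g c) (PySem.Set.ofList [1])

lemma compIter_succ (g : PySem.Dict Int (List Int)) (k : Nat) :
    compIter g (k + 1) = compF g (compIter g k) := by
  unfold compIter
  rw [List.range_succ, List.foldl_append, List.foldl_cons, List.foldl_nil]

lemma b_nodup (g : PySem.Dict Int (List Int)) (k : Nat) : (compIter g k).Nodup := by
  induction k with
  | zero => exact PySem.Set.nodup_ofList [1]
  | succ k ih =>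
    rw [compIter_succ]
    exact PySem.Set.nodup_update _ _ ih

lemma b_one_mem (g : PySem.Dict Int (List Int)) (k : Nat) : 1 ∈ compIter g k := by
  induction k with
  | zero => exact (PySem.Set.mem_ofList [1] 1).mpr (by simp)
  | succ k ih =>
    rw [compIter_succ]
    exact (PySem.Set.mem_update _ _ 1).mpr (Or.inl ih)

lemma b_sub_keys (g : PySem.Dict Int (List Int)) (h1 : g.contains 1 = true)
    (Hcl : ∀ u v, v ∈ g.getD u [] → g.contains v = true) (k : Nat) :
    ∀ x ∈ compIter g k, x ∈ g.keys := by
  induction k with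
  | zero =>
    intro x hx
    rcases (PySem.Set.mem_ofList [1] x).mp hx with hx1
    simp only [List.mem_singleton] at hx1
    subst hx1
    exact (PySem.Dict.contains_iff_mem_keys g 1).mp h1
  | succ k ih =>
    intro x hx
    rw [compIter_succ] at hx
    rcases (PySem.Set.mem_update _ _ x).mp hx with hx | hx
    · exact ih x hx
    · obtain ⟨v, _, hxv⟩ := List.mem_flatMap.mp hx
      exact (PySem.Dict.contains_iff_mem_keys g x).mp (Hcl v x hxv)

lemma b_sound (g : PySem.Dict Int (List Int)) (k : Nat) :
    ∀ x ∈ compIter g k, Relation.ReflTransGen (EdgeG g) 1 x := by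
  induction k with
  | zero =>
    intro x hx
    rcases (PySem.Set.mem_ofList [1] x).mp hx with hx1
    simp only [List.mem_singleton] at hx1
    subst hx1
    exact Relation.ReflTransGen.refl
  | succ k ih =>
    intro x hx
    rw [compIter_succ] at hx
    rcases (PySem.Set.mem_update _ _ x).mp hx with hx | hx
    · exact ih x hx
    · obtain ⟨v, hv, hxv⟩ := List.mem_flatMap.mp hx
      exact Relation.ReflTransGen.tail (ih v hv) hxv

lemma update_append (s : PySem.Set Int) (l : List Int) : ∃ t, PySem.Set.update s l = s ++ t := by
  induction l generalizing s with
  | nil => exact ⟨[], by simp [PySem.Set.update]⟩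
  | cons x l ih =>
    have hstep : PySem.Set.update s (x :: l) = PySem.Set.update (PySem.Set.add s x) l := rfl
    obtain ⟨t, ht⟩ := ih (PySem.Set.add s x)
    rw [hstep, ht]
    unfold PySem.Set.add
    split
    · exact ⟨t, rfl⟩
    · exact ⟨[x] ++ t, by rw [List.append_assoc]⟩

lemma b_fix (g : PySem.Dict Int (List Int)) (h1 : g.contains 1 = true)
    (Hcl : ∀ u v, v ∈ g.getD u [] → g.contains v = true) :
    compF g (compIter g g.keys.length) = compIter g g.keys.length := by
  have hlen : ∀ k, (compIter g k).length ≤ g.keys.length := fun k =>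
    ((b_nodup g k).subperm (fun x hx => b_sub_keys g h1 Hcl k x hx)).length_le
  have hgrow : ∀ k, ∃ t, compIter g (k+1) = compIter g k ++ t := fun k => by
    rw [compIter_succ]
    exact update_append _ _
  have hnofix : ∀ k, (∀ j < k, compIter g (j+1) ≠ compIter g j) → k + 1 ≤ (compIter g k).length := by
    intro k
    induction k with
    | zero =>
      intro _
      have : 1 ∈ compIter g 0 := b_one_mem g 0
      exact List.length_pos_of_mem this
    | succ k ih =>
      intro h
      have hk := ih (fun j hj => h j (Nat.lt_succ_of_lt hj))
      obtain ⟨t, ht⟩ := hgrow k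
      have hne := h k (Nat.lt_succ_self k)
      have htne : t ≠ [] := by
        rintro rfl
        rw [List.append_nil] at ht
        exact hne ht
      rw [ht, List.length_append]
      have := List.length_pos_of_ne_nil htne
      omega
  have hex : ∃ j, j < g.keys.length ∧ compIter g (j+1) = compIter g j := by
    by_contra hcon
    push Not at hcon
    have := hnofix g.keys.length (fun j hj => hcon j hj)
    have := hlen g.keys.length
    omega
  obtain ⟨j, hj, hfix⟩ := hex
  have hpersist : ∀ d, compIter g (j + d) = compIter g j := by
    intro d
    induction d with
    | zero => rfl
    | succ d ih =>
      have : j + (d + 1) = (j + d) + 1 := by omega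
      rw [this, compIter_succ, ih, ← compIter_succ, hfix]
  have hK : compIter g g.keys.length = compIter g j := by
    have : g.keys.length = j + (g.keys.length - j) := by omega
    rw [this, hpersist]
  rw [hK, ← compIter_succ, hfix]

lemma b_complete (g : PySem.Dict Int (List Int)) (h1 : g.contains 1 = true)
    (Hcl : ∀ u v, v ∈ g.getD u [] → g.contains v = true) (x : Int)
    (hx : Relation.ReflTransGen (EdgeG g) 1 x) : x ∈ compIter g g.keys.length := by
  induction hx with
  | refl => exact b_one_mem g _
  | tail tg h ih =>
    rw [← b_fix g h1 Hcl]
    unfold compF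
    apply (PySem.Set.mem_update _ _ _).mpr
    right
    exact List.mem_flatMap.mpr ⟨_, ih, h⟩

-- ---- assembly ----

lemma tg_one_one (edges : List (Int × Int)) (h1 : (create_graph edges).contains 1 = true) :
    Relation.TransGen (EdgeG (create_graph edges)) 1 1 := by
  obtain ⟨v, hv⟩ := List.exists_mem_of_ne_nil _ (cg_nonnil edges 1 h1)
  exact Relation.TransGen.head hv (Relation.TransGen.single ((cg_sym edges 1 v).mp hv))


-- ===== VERDICT (by name: the statement is the Claim_ definition above) =====
theorem find_componenta_spec : Claim_equal_find_componenta := by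
  unfold Claim_equal_find_componenta
  intro n m edges _
  unfold Spec_find_componenta find_componenta find_componenta_alt
  by_cases hn : n = 0
  · rw [if_pos hn, if_pos hn]
  · rw [if_neg hn, if_neg hn]
    by_cases hm : m = 0
    · rw [if_pos hm, if_pos hm]
    · rw [if_neg hm, if_neg hm]
      by_cases h1 : (create_graph edges).contains 1 = true
      · rw [if_neg (by simpa using h1), if_neg (by simpa using h1)]
        simp only []
        set g := create_graph edges with hg
        set visited := dfsA g (g.keys.length + 1) 1
          (g.keys.foldl (fun vis v => vis.insert v false) PySem.Dict.empty) with hvisited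
        have hkeys : visited.keys = g.keys := by
          obtain ⟨k1, _, _, _⟩ := dfs_inv g (fun u v h => cg_closed edges u v h) (cg_nodup edges)
            (g.keys.length + 1) 1 (g.keys.foldl (fun vis v => vis.insert v false) PySem.Dict.empty)
            (vis0_keys g (cg_nodup edges))
            (by have := fc_le (g.keys.foldl (fun vis v => vis.insert v false) PySem.Dict.empty)
                rw [vis0_keys g (cg_nodup edges)] at this
                omega)
          rw [hvisited, k1, vis0_keys g (cg_nodup edges)]
        have hfilter : visited.keys.foldl
            (fun acc v => if visited.getD v false then acc ++ [v] else acc) []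
            = visited.keys.filter (fun v => visited.getD v false) := by
          rw [PySem.List.foldl_append_if (fun v => visited.getD v false) (fun v => v) visited.keys []]
          simp
        rw [hfilter]
        have hperm : (visited.keys.filter (fun v => visited.getD v false)).Perm
            (compIter g g.keys.length) := by
          apply (List.perm_ext_iff_of_nodup (List.Nodup.filter _ (hkeys ▸ cg_nodup edges))
            (b_nodup g g.keys.length)).mpr
          intro u
          rw [List.mem_filter]
          constructor
          · rintro ⟨_, hu⟩
            have htg : Relation.TransGen (EdgeG g) 1 u := (A_marked_iff edges u).mp (by simpa using hu)
            exact b_complete g h1 (fun a b h => cg_closed edges a b h) u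
              (Relation.TransGen.to_reflTransGen htg)
          · intro hu
            have hrt := b_sound g g.keys.length u hu
            have htg : Relation.TransGen (EdgeG g) 1 u := by
              rcases Relation.reflTransGen_iff_eq_or_transGen.mp hrt with rfl | htg
              · exact tg_one_one edges h1
              · exact htg
            have hmarked := (A_marked_iff edges u).mpr htg
            refine ⟨?_, by simpa using hmarked⟩
            rw [hkeys]
            have : g.contains u = true := by
              cases htg with
              | single h => exact cg_closed edges _ _ h
              | tail _ h => exact cg_closed edges _ _ h
            exact (PySem.Dict.contains_iff_mem_keys g u).mp this
        have hsorted : PySem.List.sorted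
              (visited.keys.filter (fun v => visited.getD v false)) (fun x => x) false
            = PySem.List.sorted (compIter g g.keys.length) (fun x => x) false :=
          (PySem.List.sorted_id_eq_sorted_id_iff_perm _ _).mpr hperm
        rw [hsorted]
        rfl
      · rw [if_pos (by simpa using h1), if_pos (by simpa using h1)]
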